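-- pv_equiv track=rewrite | github.com/NLe1/Competitive-Programming | Leetcode/Leetcode-01 Matrix.py | helper
-- ===== SOURCE A (Python) =====
-- def helper(visited, ans, countDone, ctr):
--     for i in range(len(ans)):
--         for j in range(len(ans[0])):
--             # if the current spot not zero
--             if ans[i][j] == ctr:
--                 if j - 1 >= 0 and ans[i][j - 1] > ctr + 1:
--                     ans[i][j - 1] = ctr + 1
--                     if not visited[i][j - 1]:
--                         visited[i][j - 1] = True
--                         countDone -= 1
--                 if i - 1 >= 0 and ans[i - 1][j] > ctr + 1:
--                     ans[i - 1][j] = ctr + 1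
--                     if not visited[i - 1][j]:
--                         visited[i - 1][j] = True
--                         countDone -= 1
--                 if i + 1 <= len(ans) - 1 and ans[i + 1][j] > ctr + 1:
--                     ans[i + 1][j] = ctr + 1
--                     if not visited[i + 1][j]:
--                         visited[i + 1][j] = True
--                         countDone -= 1
--                 if j + 1 <= len(ans[0])-1 and ans[i][j + 1] > ctr + 1:
--                     ans[i][j + 1] = ctr + 1
--                     if not visited[i][j + 1]:
--                         visited[i][j + 1] = True
--                         countDone -= 1
--     return countDone
-- ===== SOURCE B (Python) =====
-- def helper(visited, ans, countDone, ctr):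
--     # Pure counting reformulation: a cell loses "not done" status in this pass
--     # exactly when it holds a value > ctr+1, is unvisited, and sits next to a
--     # ctr-valued cell (ctr cells are never mutated by the pass, so the count is
--     # order-independent).  Returns countDone minus that count; does not mutate
--     # its arguments.
--     n = len(ans)
--     m = len(ans[0]) if ans else 0
--
--     def near(i, j):
--         return ((j >= 1 and ans[i][j - 1] == ctr)
--                 or (i >= 1 and ans[i - 1][j] == ctr)
--                 or (i + 1 < n and ans[i + 1][j] == ctr)
--                 or (j + 1 < m and ans[i][j + 1] == ctr))
--
--     return countDone - sum(1 for i in range(n) for j in range(m)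
--                            if ans[i][j] > ctr + 1 and near(i, j)
--                            and not visited[i][j])
-- ===== Notes on version B (the rewrite author's own statement) =====
-- stated objective: alternative
-- what changed: A performs a stateful push relaxation (each ctr cell writes ctr+1 into its four neighbours, mutating ans/visited and decrementing countDone); B mutates nothing and directly returns countDone minus a pure count of the cells > ctr+1 that are unvisited and adjacent to a ctr cell, which is provably the same value since ctr cells are never overwritten.
import Mathlib
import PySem

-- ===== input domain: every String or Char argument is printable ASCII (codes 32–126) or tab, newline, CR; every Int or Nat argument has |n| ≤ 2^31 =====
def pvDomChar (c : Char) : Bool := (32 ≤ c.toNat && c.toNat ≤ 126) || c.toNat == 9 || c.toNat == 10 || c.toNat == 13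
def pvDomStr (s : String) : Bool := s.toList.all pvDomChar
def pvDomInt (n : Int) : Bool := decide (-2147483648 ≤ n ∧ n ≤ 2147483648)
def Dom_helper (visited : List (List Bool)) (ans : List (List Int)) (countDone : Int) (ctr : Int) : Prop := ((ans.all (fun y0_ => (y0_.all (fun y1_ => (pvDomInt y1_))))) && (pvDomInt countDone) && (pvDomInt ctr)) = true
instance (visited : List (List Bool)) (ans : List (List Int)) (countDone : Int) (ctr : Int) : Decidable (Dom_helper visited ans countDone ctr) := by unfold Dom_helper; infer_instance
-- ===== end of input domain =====

-- B replaces A's in-place relaxation pass by a pure count of the newly reachable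
-- cells (countDone minus the number of unvisited cells > ctr+1 adjacent to a ctr
-- cell); the equivalence proved is about the RETURN value only: A mutates
-- `visited` and `ans` in place, B does not mutate its arguments.

-- ===== PORT A =====
-- shared 2D grid read/write helpers (Python g[i][j] with in-range indices;
-- Pre_helper keeps the out-of-range default unreachable)
def cell {α : Type} (d : α) (g : List (List α)) (i j : Nat) : α := (g.getD i []).getD j d

def setCell {α : Type} (g : List (List α)) (i j : Nat) (x : α) : List (List α) :=
  g.set i ((g.getD i []).set j x)

-- A's mutable state: (visited, ans, countDone)
abbrev PassSt : Type := List (List Bool) × List (List Int) × Int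

-- one neighbour-update block of A at target (r, c)
def relax (ctr : Int) (r c : Nat) (s : PassSt) : PassSt :=
  if ctr + 1 < cell 0 s.2.1 r c then
    let ans' := setCell s.2.1 r c (ctr + 1)
    if cell false s.1 r c = false then
      (setCell s.1 r c true, ans', s.2.2 - 1)
    else (s.1, ans', s.2.2)
  else s

-- body of A's double loop at source (i, j)
def stepA (ctr : Int) (n m i j : Nat) (s : PassSt) : PassSt :=
  if cell 0 s.2.1 i j = ctr then
    let s1 := if 1 ≤ j then relax ctr i (j - 1) s else s
    let s2 := if 1 ≤ i then relax ctr (i - 1) j s1 else s1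
    let s3 := if i + 1 ≤ n - 1 then relax ctr (i + 1) j s2 else s2
    if j + 1 ≤ m - 1 then relax ctr i (j + 1) s3 else s3
  else s

def helper (visited : List (List Bool)) (ans : List (List Int)) (countDone : Int) (ctr : Int) : Int :=
  let n := ans.length
  let m := (ans.headD []).length
  ((List.range n).foldl
      (fun s i => (List.range m).foldl (fun s j => stepA ctr n m i j s) s)
      (visited, ans, countDone)).2.2

-- ===== PORT B =====
-- Source B's `near(i, j)`: does (i, j) have an in-bounds neighbour equal to ctr?
def near (ans : List (List Int)) (ctr : Int) (n m i j : Nat) : Bool :=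
  (decide (1 ≤ j) && decide (cell 0 ans i (j - 1) = ctr)) ||
  (decide (1 ≤ i) && decide (cell 0 ans (i - 1) j = ctr)) ||
  (decide (i + 1 < n) && decide (cell 0 ans (i + 1) j = ctr)) ||
  (decide (j + 1 < m) && decide (cell 0 ans i (j + 1) = ctr))

def helper_alt (visited : List (List Bool)) (ans : List (List Int)) (countDone : Int) (ctr : Int) : Int :=
  let n := ans.length
  let m := (ans.headD []).length
  countDone -
    (List.range n).foldl
      (fun acc i => acc +
        (((List.range m).filter (fun j =>
            decide (ctr + 1 < cell 0 ans i j) && near ans ctr n m i j &&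
            !cell false visited i j)).length : Int))
      0

-- ===== PRECONDITION & SPEC =====
-- Pre_helper: exactly the inputs on which A raises no IndexError: every row of
-- ans at least as long as row 0 (A reads ans[i][j] for all j < len(ans[0])), and
-- visited in range at every cell the pass touches, i.e. every cell > ctr+1 that
-- has an in-bounds neighbour equal to ctr.
def Pre_helper (visited : List (List Bool)) (ans : List (List Int)) (countDone : Int) (ctr : Int) : Prop :=
  ans = [] ∨
    ((∀ r ∈ ans, (ans.headD []).length ≤ r.length) ∧
     (∀ i ∈ List.range ans.length, ∀ j ∈ List.range (ans.headD []).length,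
       ctr + 1 < (ans.getD i []).getD j 0 →
       ((1 ≤ j ∧ (ans.getD i []).getD (j - 1) 0 = ctr) ∨
        (1 ≤ i ∧ (ans.getD (i - 1) []).getD j 0 = ctr) ∨
        (i + 1 < ans.length ∧ (ans.getD (i + 1) []).getD j 0 = ctr) ∨
        (j + 1 < (ans.headD []).length ∧ (ans.getD i []).getD (j + 1) 0 = ctr)) →
       i < visited.length ∧ j < (visited.getD i []).length))
instance (visited : List (List Bool)) (ans : List (List Int)) (countDone : Int) (ctr : Int) : Decidable (Pre_helper visited ans countDone ctr) := by unfold Pre_helper; infer_instance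

def pvWitness_helper : List (List Bool) × List (List Int) × Int × Int :=
  ([[false, true], [false, false]], [[0, 5], [7, 0]], 4, 0)

def Spec_helper (visited : List (List Bool)) (ans : List (List Int)) (countDone : Int) (ctr : Int) (out : Int) : Prop := out = helper_alt visited ans countDone ctr
instance (visited : List (List Bool)) (ans : List (List Int)) (countDone : Int) (ctr : Int) (out : Int) : Decidable (Spec_helper visited ans countDone ctr out) := by unfold Spec_helper; infer_instance

-- ===== CLAIM (what is proved, stated in full; the proofs are below) =====
def Claim_equal_helper : Prop := ∀ (visited : List (List Bool)) (ans : List (List Int)) (countDone : Int) (ctr : Int), Dom_helper visited ans countDone ctr → Pre_helper visited ans countDone ctr → Spec_helper visited ans countDone ctr (helper visited ans countDone ctr)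

-- ===== LEMMAS AND PROOFS =====

-- the grid cells in row-major order
def winL (n m : Nat) : List (Nat × Nat) := (List.range n) ×ˢ (List.range m)

-- shape facts extracted from Pre_helper
structure Shaped (v0 : List (List Bool)) (a0 : List (List Int)) (ctr : Int) (n m : Nat) : Prop where
  mA : ∀ r, r < n → m ≤ (a0.getD r []).length
  mV : ∀ r c, r < n → c < m → ctr + 1 < cell 0 a0 r c → near a0 ctr n m r c = true →
    r < v0.length ∧ c < (v0.getD r []).length

-- loop invariant of A's pass: f marks the cells overwritten so far
structure PassInv (v0 : List (List Bool)) (a0 : List (List Int)) (ctr c0 : Int) (n m : Nat)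
    (f : Nat → Nat → Bool) (s : PassSt) : Prop where
  lenA : s.2.1.length = a0.length
  rowA : ∀ i, (s.2.1.getD i []).length = (a0.getD i []).length
  lenV : s.1.length = v0.length
  rowV : ∀ i, (s.1.getD i []).length = (v0.getD i []).length
  ansEq : ∀ i j, cell 0 s.2.1 i j = if f i j then ctr + 1 else cell 0 a0 i j
  visEq : ∀ i j, cell false s.1 i j = (cell false v0 i j || f i j)
  fDom : ∀ i j, f i j = true → i < n ∧ j < m ∧ ctr + 1 < cell 0 a0 i j
  cd : s.2.2 = c0 - (((winL n m).filter (fun p => f p.1 p.2 && !cell false v0 p.1 p.2)).length : Int)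

-- the mark added by one relax at target (r, c)
def extF (a0 : List (List Int)) (ctr : Int) (f : Nat → Nat → Bool) (r c : Nat) : Nat → Nat → Bool :=
  fun i j => f i j || (decide (i = r) && decide (j = c) && decide (ctr + 1 < cell 0 a0 r c))

-- the marks added by one stepA at source (i, j)
def stepF (a0 : List (List Int)) (ctr : Int) (n m : Nat) (f : Nat → Nat → Bool) (i j : Nat) : Nat → Nat → Bool :=
  if cell 0 a0 i j = ctr then
    let f1 := if 1 ≤ j then extF a0 ctr f i (j - 1) else f
    let f2 := if 1 ≤ i then extF a0 ctr f1 (i - 1) j else f1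
    let f3 := if i + 1 < n then extF a0 ctr f2 (i + 1) j else f2
    if j + 1 < m then extF a0 ctr f3 i (j + 1) else f3
  else f

-- "source p pushes ctr+1 into target (i, j)"
def PushProp (a0 : List (List Int)) (ctr : Int) (n m : Nat) (p : Nat × Nat) (i j : Nat) : Prop :=
  cell 0 a0 p.1 p.2 = ctr ∧ ctr + 1 < cell 0 a0 i j ∧
  ((i = p.1 ∧ j + 1 = p.2) ∨ (i + 1 = p.1 ∧ j = p.2) ∨
   (i = p.1 + 1 ∧ j = p.2 ∧ i < n) ∨ (i = p.1 ∧ j = p.2 + 1 ∧ j < m))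

lemma cell_setCell {α : Type} (d : α) (g : List (List α)) (r c : Nat) (x : α)
    (hr : r < g.length) (hc : c < (g.getD r []).length) (i j : Nat) :
    cell d (setCell g r c x) i j = if i = r ∧ j = c then x else cell d g i j := by
  unfold cell setCell
  by_cases hi : i = r
  · subst hi
    have hrow : (g.set i ((g.getD i []).set c x)).getD i [] = (g.getD i []).set c x := by
      rw [List.getD_eq_getElem?_getD, List.getElem?_set]
      simp [hr]
    rw [hrow]
    by_cases hj : j = c
    · subst hj
      rw [List.getD_eq_getElem?_getD, List.getElem?_set]
      simp [← List.getD_eq_getElem?_getD, hc]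
    · rw [List.getD_eq_getElem?_getD, List.getElem?_set, if_neg (fun h => hj h.symm),
        ← List.getD_eq_getElem?_getD]
      simp [hj]
  · have hout : (g.set r ((g.getD r []).set c x)).getD i [] = g.getD i [] := by
      rw [List.getD_eq_getElem?_getD, List.getElem?_set, if_neg (fun h => hi h.symm),
        ← List.getD_eq_getElem?_getD]
    rw [hout]
    simp [hi]

lemma length_setCell {α : Type} (g : List (List α)) (r c : Nat) (x : α) :
    (setCell g r c x).length = g.length := by
  simp [setCell]

lemma rowlen_setCell {α : Type} (g : List (List α)) (r c : Nat) (x : α) (i : Nat) :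
    ((setCell g r c x).getD i []).length = (g.getD i []).length := by
  unfold setCell
  rw [List.getD_eq_getElem?_getD, List.getD_eq_getElem?_getD, List.getElem?_set]
  by_cases hi : r = i
  · subst hi
    by_cases hlen : r < g.length
    · simp [hlen, List.getD_eq_getElem?_getD]
    · simp [hlen, List.getElem?_eq_none (by omega : g.length ≤ r)]
  · simp [hi]

lemma PassInv.congr {v0 : List (List Bool)} {a0 : List (List Int)} {ctr c0 : Int} {n m : Nat}
    {f f' : Nat → Nat → Bool} {s : PassSt}
    (h : PassInv v0 a0 ctr c0 n m f s) (hf : ∀ i j, f i j = f' i j) :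
    PassInv v0 a0 ctr c0 n m f' s := by
  refine ⟨h.lenA, h.rowA, h.lenV, h.rowV, ?_, ?_, ?_, ?_⟩
  · intro i j; rw [← hf i j]; exact h.ansEq i j
  · intro i j; rw [← hf i j]; exact h.visEq i j
  · intro i j hij; exact h.fDom i j (by rw [hf i j]; exact hij)
  · rw [h.cd]
    have : (winL n m).filter (fun p => f p.1 p.2 && !cell false v0 p.1 p.2)
        = (winL n m).filter (fun p => f' p.1 p.2 && !cell false v0 p.1 p.2) :=
      List.filter_congr (fun p _ => by rw [hf p.1 p.2])
    rw [this]

lemma length_filter_flip {α : Type} [BEq α] [LawfulBEq α] (l : List α) (p q : α → Bool) (a : α)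
    (hcount : l.count a = 1) (hagree : ∀ x ∈ l, x ≠ a → q x = p x)
    (hpa : p a = false) (hqa : q a = true) :
    (l.filter q).length = (l.filter p).length + 1 := by
  induction l with
  | nil => simp at hcount
  | cons x t ih =>
    by_cases hx : x = a
    · subst hx
      have ht : t.count x = 0 := by
        rw [List.count_cons] at hcount; simp at hcount; omega
      have hnot : x ∉ t := List.count_eq_zero.mp ht
      have hft : t.filter q = t.filter p :=
        List.filter_congr (fun y hy =>
          hagree y (List.mem_cons_of_mem _ hy) (fun h => hnot (h ▸ hy)))
      simp [List.filter_cons, hqa, hpa, hft]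
    · have hqx : q x = p x := hagree x List.mem_cons_self hx
      have ht : t.count a = 1 := by
        rw [List.count_cons] at hcount
        simp [show (x == a) = false by simp [hx]] at hcount
        exact hcount
      have ih' := ih ht (fun y hy hya => hagree y (List.mem_cons_of_mem _ hy) hya)
      cases hpx : p x <;> simp [List.filter_cons, hqx, hpx, ih']

lemma count_winL (n m r c : Nat) (hr : r < n) (hc : c < m) :
    (winL n m).count (r, c) = 1 := by
  have nd : (winL n m).Nodup := List.Nodup.product List.nodup_range List.nodup_range
  have hmem : (r, c) ∈ winL n m :=
    List.mem_product.mpr ⟨List.mem_range.mpr hr, List.mem_range.mpr hc⟩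
  exact List.count_eq_one_of_mem nd hmem

lemma relax_inv {v0 : List (List Bool)} {a0 : List (List Int)} {ctr c0 : Int} {n m : Nat}
    {f : Nat → Nat → Bool} {s : PassSt} (sh : Shaped v0 a0 ctr n m)
    (h : PassInv v0 a0 ctr c0 n m f s) (hr : r < n) (hc : c < m) (hn : n = a0.length)
    (hnr : ctr + 1 < cell 0 a0 r c → near a0 ctr n m r c = true) :
    PassInv v0 a0 ctr c0 n m (extF a0 ctr f r c) (relax ctr r c s) := by
  have hrA : r < s.2.1.length := by rw [h.lenA]; omega
  have hcA : c < (s.2.1.getD r []).length := by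
    rw [h.rowA]; exact lt_of_lt_of_le hc (sh.mA r hr)
  unfold relax
  by_cases hval : ctr + 1 < cell 0 s.2.1 r c
  · rw [if_pos hval]
    have hfrc : f r c = false := by
      cases hfrc : f r c
      · rfl
      · exfalso
        have he := h.ansEq r c
        rw [hfrc] at he
        simp at he
        rw [he] at hval
        omega
    have ha0 : ctr + 1 < cell 0 a0 r c := by
      have he := h.ansEq r c
      rw [hfrc] at he
      simp at he
      rw [← he]
      exact hval
    obtain ⟨hrV0, hcV0⟩ := sh.mV r c hr hc ha0 (hnr ha0)
    have hrV : r < s.1.length := by rw [h.lenV]; exact hrV0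
    have hcV : c < (s.1.getD r []).length := by rw [h.rowV]; exact hcV0
    have hvv : cell false s.1 r c = cell false v0 r c := by
      rw [h.visEq r c, hfrc]
      simp
    have hext : ∀ i j, extF a0 ctr f r c i j = (f i j || (decide (i = r) && decide (j = c))) := by
      intro i j
      unfold extF
      rw [decide_eq_true ha0]
      simp
    have hdneq : ∀ i j, ¬(i = r ∧ j = c) → (decide (i = r) && decide (j = c)) = false := by
      intro i j hij
      rcases not_and_or.mp hij with h' | h' <;> simp [h']
    by_cases hv : cell false s.1 r c = false
    · rw [if_pos hv]
      have hv0 : cell false v0 r c = false := by rw [← hvv]; exact hv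
      refine ⟨?_, ?_, ?_, ?_, ?_, ?_, ?_, ?_⟩
      · dsimp only; rw [length_setCell, h.lenA]
      · intro i; dsimp only; rw [rowlen_setCell, h.rowA]
      · dsimp only; rw [length_setCell, h.lenV]
      · intro i; dsimp only; rw [rowlen_setCell, h.rowV]
      · intro i j
        dsimp only
        rw [cell_setCell 0 s.2.1 r c (ctr + 1) hrA hcA i j, hext i j]
        by_cases hij : i = r ∧ j = c
        · obtain ⟨rfl, rfl⟩ := hij
          simp [hfrc]
        · rw [if_neg hij, h.ansEq i j, hdneq i j hij, Bool.or_false]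
      · intro i j
        dsimp only
        rw [cell_setCell false s.1 r c true hrV hcV i j, hext i j]
        by_cases hij : i = r ∧ j = c
        · obtain ⟨rfl, rfl⟩ := hij
          simp
        · rw [if_neg hij, h.visEq i j, hdneq i j hij, Bool.or_false]
      · intro i j hf
        rw [hext i j] at hf
        cases hfij : f i j
        · rw [hfij] at hf
          simp at hf
          obtain ⟨rfl, rfl⟩ := hf
          exact ⟨hr, hc, ha0⟩
        · exact h.fDom i j hfij
      · dsimp only
        rw [h.cd]
        have hflip : ((winL n m).filter (fun p => extF a0 ctr f r c p.1 p.2 && !cell false v0 p.1 p.2)).length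
            = ((winL n m).filter (fun p => f p.1 p.2 && !cell false v0 p.1 p.2)).length + 1 := by
          apply length_filter_flip (winL n m) _ _ (r, c) (count_winL n m r c hr hc)
          · intro x hx hneq
            have hij : ¬(x.1 = r ∧ x.2 = c) := by
              intro hcon
              apply hneq
              cases x
              simp at hcon ⊢
              exact hcon
            rw [hext x.1 x.2, hdneq x.1 x.2 hij, Bool.or_false]
          · dsimp only
            rw [hfrc]
            simp
          · dsimp only
            rw [hext r c, hfrc, hv0]
            simp
        rw [hflip]
        push_cast
        ring
    · rw [if_neg hv]
      have hv0 : cell false v0 r c = true := by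
        rw [← hvv]
        cases hcv : cell false s.1 r c
        · exact absurd hcv hv
        · rfl
      refine ⟨?_, ?_, ?_, ?_, ?_, ?_, ?_, ?_⟩
      · dsimp only; rw [length_setCell, h.lenA]
      · intro i; dsimp only; rw [rowlen_setCell, h.rowA]
      · exact h.lenV
      · exact h.rowV
      · intro i j
        dsimp only
        rw [cell_setCell 0 s.2.1 r c (ctr + 1) hrA hcA i j, hext i j]
        by_cases hij : i = r ∧ j = c
        · obtain ⟨rfl, rfl⟩ := hij
          simp [hfrc]
        · rw [if_neg hij, h.ansEq i j, hdneq i j hij, Bool.or_false]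
      · intro i j
        dsimp only
        rw [h.visEq i j, hext i j]
        by_cases hij : i = r ∧ j = c
        · obtain ⟨rfl, rfl⟩ := hij
          rw [hv0, hfrc]
          simp
        · rw [hdneq i j hij, Bool.or_false]
      · intro i j hf
        rw [hext i j] at hf
        cases hfij : f i j
        · rw [hfij] at hf
          simp at hf
          obtain ⟨rfl, rfl⟩ := hf
          exact ⟨hr, hc, ha0⟩
        · exact h.fDom i j hfij
      · dsimp only
        have hsame : (winL n m).filter (fun p => extF a0 ctr f r c p.1 p.2 && !cell false v0 p.1 p.2)
            = (winL n m).filter (fun p => f p.1 p.2 && !cell false v0 p.1 p.2) := by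
          apply List.filter_congr
          intro x hx
          by_cases hij : x.1 = r ∧ x.2 = c
          · obtain ⟨h1, h2⟩ := hij
            rw [hext x.1 x.2, h1, h2, hv0]
            simp
          · rw [hext x.1 x.2, hdneq x.1 x.2 hij, Bool.or_false]
        rw [hsame]
        exact h.cd
  · rw [if_neg hval]
    refine h.congr (fun i j => ?_)
    unfold extF
    by_cases hij : i = r ∧ j = c
    · obtain ⟨rfl, rfl⟩ := hij
      cases hfrc : f i j
      · have he := h.ansEq i j
        rw [hfrc] at he
        simp at he
        have hna : ¬ ctr + 1 < cell 0 a0 i j := by rw [← he]; exact hval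
        simp [hna]
      · simp
    · have hd : (decide (i = r) && decide (j = c) && decide (ctr + 1 < cell 0 a0 r c)) = false := by
        rcases not_and_or.mp hij with h' | h' <;> simp [h']
      rw [hd, Bool.or_false]

lemma relax_inv_if {v0 : List (List Bool)} {a0 : List (List Int)} {ctr c0 : Int} {n m : Nat}
    {f : Nat → Nat → Bool} {s : PassSt} (sh : Shaped v0 a0 ctr n m) (hn : n = a0.length)
    (h : PassInv v0 a0 ctr c0 n m f s) (b b' : Prop) [Decidable b] [Decidable b']
    (hbb : b ↔ b') {r c : Nat} (hb : b → r < n ∧ c < m)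
    (hnr : b → ctr + 1 < cell 0 a0 r c → near a0 ctr n m r c = true) :
    PassInv v0 a0 ctr c0 n m (if b' then extF a0 ctr f r c else f)
      (if b then relax ctr r c s else s) := by
  by_cases hb0 : b
  · rw [if_pos hb0, if_pos (hbb.mp hb0)]
    exact relax_inv sh h (hb hb0).1 (hb hb0).2 hn (hnr hb0)
  · rw [if_neg hb0, if_neg (fun h' => hb0 (hbb.mpr h'))]
    exact h

lemma step_inv {v0 : List (List Bool)} {a0 : List (List Int)} {ctr c0 : Int} {n m : Nat}
    {f : Nat → Nat → Bool} {s : PassSt} (sh : Shaped v0 a0 ctr n m)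
    (h : PassInv v0 a0 ctr c0 n m f s) (hi : i < n) (hj : j < m) (hn : n = a0.length) :
    PassInv v0 a0 ctr c0 n m (stepF a0 ctr n m f i j) (stepA ctr n m i j s) := by
  have hsrc_iff : (cell 0 s.2.1 i j = ctr) ↔ (cell 0 a0 i j = ctr) := by
    rw [h.ansEq i j]
    cases hf : f i j
    · simp
    · have h3 := (h.fDom i j hf).2.2
      simp only [if_pos trivial, if_true]
      constructor <;> intro he <;> omega
  unfold stepA stepF
  by_cases hsrc : cell 0 a0 i j = ctr
  · rw [if_pos (hsrc_iff.mpr hsrc), if_pos hsrc]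
    have hnr1 : 1 ≤ j → ctr + 1 < cell 0 a0 i (j - 1) → near a0 ctr n m i (j - 1) = true := by
      intro hg _
      simp only [near, Bool.or_eq_true, Bool.and_eq_true, decide_eq_true_eq]
      refine Or.inr ⟨by omega, ?_⟩
      rw [show j - 1 + 1 = j from by omega]
      exact hsrc
    have hnr2 : 1 ≤ i → ctr + 1 < cell 0 a0 (i - 1) j → near a0 ctr n m (i - 1) j = true := by
      intro hg _
      simp only [near, Bool.or_eq_true, Bool.and_eq_true, decide_eq_true_eq]
      refine Or.inl (Or.inr ⟨by omega, ?_⟩)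
      rw [show i - 1 + 1 = i from by omega]
      exact hsrc
    have hnr3 : i + 1 ≤ n - 1 → ctr + 1 < cell 0 a0 (i + 1) j → near a0 ctr n m (i + 1) j = true := by
      intro hg _
      simp only [near, Bool.or_eq_true, Bool.and_eq_true, decide_eq_true_eq]
      refine Or.inl (Or.inl (Or.inr ⟨by omega, ?_⟩))
      rw [show i + 1 - 1 = i from by omega]
      exact hsrc
    have hnr4 : j + 1 ≤ m - 1 → ctr + 1 < cell 0 a0 i (j + 1) → near a0 ctr n m i (j + 1) = true := by
      intro hg _
      simp only [near, Bool.or_eq_true, Bool.and_eq_true, decide_eq_true_eq]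
      refine Or.inl (Or.inl (Or.inl ⟨by omega, ?_⟩))
      rw [show j + 1 - 1 = j from by omega]
      exact hsrc
    exact relax_inv_if sh hn
      (relax_inv_if sh hn
        (relax_inv_if sh hn
          (relax_inv_if sh hn h (1 ≤ j) (1 ≤ j) Iff.rfl (fun _ => ⟨hi, by omega⟩) hnr1)
          (1 ≤ i) (1 ≤ i) Iff.rfl (fun _ => ⟨by omega, hj⟩) hnr2)
        (i + 1 ≤ n - 1) (i + 1 < n) (by omega) (fun hb => ⟨by omega, hj⟩) hnr3)
      (j + 1 ≤ m - 1) (j + 1 < m) (by omega) (fun hb => ⟨hi, by omega⟩) hnr4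
  · rw [if_neg (fun h' => hsrc (hsrc_iff.mp h')), if_neg hsrc]
    exact h

lemma fold_inv {v0 : List (List Bool)} {a0 : List (List Int)} {ctr c0 : Int} {n m : Nat}
    (sh : Shaped v0 a0 ctr n m) (hn : n = a0.length) :
    ∀ (P : List (Nat × Nat)) (f : Nat → Nat → Bool) (s : PassSt),
      (∀ p ∈ P, p.1 < n ∧ p.2 < m) → PassInv v0 a0 ctr c0 n m f s →
      PassInv v0 a0 ctr c0 n m
        (P.foldl (fun g p => stepF a0 ctr n m g p.1 p.2) f)
        (P.foldl (fun s p => stepA ctr n m p.1 p.2 s) s) := by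
  intro P
  induction P with
  | nil => intro f s _ h; exact h
  | cons p t ih =>
    intro f s hb h
    simp only [List.foldl_cons]
    exact ih _ _ (fun q hq => hb q (List.mem_cons_of_mem _ hq))
      (step_inv sh h (hb p List.mem_cons_self).1 (hb p List.mem_cons_self).2 hn)

lemma extF_true_iff (a0 : List (List Int)) (ctr : Int) (f : Nat → Nat → Bool) (r c i j : Nat) :
    extF a0 ctr f r c i j = true ↔ f i j = true ∨ (i = r ∧ j = c ∧ ctr + 1 < cell 0 a0 r c) := by
  simp [extF, decide_eq_true_iff, and_assoc]

lemma stepF_true_iff (a0 : List (List Int)) (ctr : Int) (n m : Nat)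
    (f : Nat → Nat → Bool) (p q i j : Nat) :
    stepF a0 ctr n m f p q i j = true ↔ f i j = true ∨ PushProp a0 ctr n m (p, q) i j := by
  unfold stepF
  by_cases hsrc : cell 0 a0 p q = ctr
  · rw [if_pos hsrc]
    have key : ∀ (g : Nat → Nat → Bool) (b : Prop) (inst : Decidable b) (r c : Nat),
        ((if b then extF a0 ctr g r c else g) i j = true) ↔
          (g i j = true ∨ (b ∧ i = r ∧ j = c ∧ ctr + 1 < cell 0 a0 r c)) := by
      intro g b inst r c
      split
      · rename_i hbt
        rw [extF_true_iff]
        tauto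
      · rename_i hbf
        constructor
        · exact Or.inl
        · rintro (hf | ⟨hb, _⟩)
          · exact hf
          · exact absurd hb hbf
    rw [key, key, key, key]
    unfold PushProp
    constructor
    · rintro ((((hf | ⟨hq, rfl, rfl, hv⟩) | ⟨hp, rfl, rfl, hv⟩) | ⟨hn3, rfl, rfl, hv⟩) |
        ⟨hm4, rfl, rfl, hv⟩)
      · exact Or.inl hf
      · exact Or.inr ⟨hsrc, hv, Or.inl ⟨rfl, by omega⟩⟩
      · exact Or.inr ⟨hsrc, hv, Or.inr (Or.inl ⟨by omega, rfl⟩)⟩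
      · exact Or.inr ⟨hsrc, hv, Or.inr (Or.inr (Or.inl ⟨rfl, rfl, by omega⟩))⟩
      · exact Or.inr ⟨hsrc, hv, Or.inr (Or.inr (Or.inr ⟨rfl, rfl, by omega⟩))⟩
    · rintro (hf | ⟨-, hv, (⟨rfl, hq⟩ | ⟨hip, rfl⟩ | ⟨rfl, rfl, hin⟩ | ⟨rfl, rfl, hjm⟩)⟩)
      · exact Or.inl (Or.inl (Or.inl (Or.inl hf)))
      · refine Or.inl (Or.inl (Or.inl (Or.inr ⟨by omega, rfl, by omega, ?_⟩)))
        rw [show q - 1 = j from by omega]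
        exact hv
      · refine Or.inl (Or.inl (Or.inr ⟨by omega, by omega, rfl, ?_⟩))
        rw [show p - 1 = i from by omega]
        exact hv
      · exact Or.inl (Or.inr ⟨hin, rfl, rfl, hv⟩)
      · exact Or.inr ⟨hjm, rfl, rfl, hv⟩
  · rw [if_neg hsrc]
    constructor
    · exact Or.inl
    · rintro (hf | hp)
      · exact hf
      · obtain ⟨h1, -⟩ := hp
        exact absurd h1 hsrc

lemma foldl_stepF_true_iff (a0 : List (List Int)) (ctr : Int) (n m : Nat) :
    ∀ (P : List (Nat × Nat)) (f : Nat → Nat → Bool) (i j : Nat),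
      ((P.foldl (fun g p => stepF a0 ctr n m g p.1 p.2) f) i j = true) ↔
        (f i j = true ∨ ∃ p ∈ P, PushProp a0 ctr n m p i j) := by
  intro P
  induction P with
  | nil => intro f i j; simp
  | cons p t ih =>
    obtain ⟨p1, p2⟩ := p
    intro f i j
    simp only [List.foldl_cons]
    rw [ih, stepF_true_iff]
    simp only [List.mem_cons]
    constructor
    · rintro ((hf | hp) | ⟨x, hx, hpx⟩)
      · exact Or.inl hf
      · exact Or.inr ⟨(p1, p2), Or.inl rfl, hp⟩
      · exact Or.inr ⟨x, Or.inr hx, hpx⟩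
    · rintro (hf | ⟨x, (rfl | hx), hpx⟩)
      · exact Or.inl (Or.inl hf)
      · exact Or.inl (Or.inr hpx)
      · exact Or.inr ⟨x, hx, hpx⟩

lemma push_iff_near (a0 : List (List Int)) (ctr : Int) (n m i j : Nat) (hi : i < n) (hj : j < m) :
    (∃ p ∈ winL n m, PushProp a0 ctr n m p i j) ↔
      (ctr + 1 < cell 0 a0 i j ∧ near a0 ctr n m i j = true) := by
  constructor
  · rintro ⟨⟨p, q⟩, hmem, hpush⟩
    obtain ⟨hsrc, hv, hdir⟩ := hpush
    obtain ⟨hpn, hqm⟩ := List.mem_product.mp hmem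
    rw [List.mem_range] at hpn hqm
    refine ⟨hv, ?_⟩
    unfold near
    simp only [Bool.or_eq_true, Bool.and_eq_true, decide_eq_true_eq]
    rcases hdir with ⟨rfl, hq⟩ | ⟨hip, rfl⟩ | ⟨rfl, rfl, hin⟩ | ⟨rfl, rfl, hjm⟩
    · refine Or.inr ⟨by omega, ?_⟩
      rw [show j + 1 = q from hq]
      exact hsrc
    · refine Or.inl (Or.inr ⟨by omega, ?_⟩)
      rw [show i + 1 = p from hip]
      exact hsrc
    · refine Or.inl (Or.inl (Or.inr ⟨by omega, ?_⟩))
      rw [show p + 1 - 1 = p from by omega]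
      exact hsrc
    · refine Or.inl (Or.inl (Or.inl ⟨by omega, ?_⟩))
      rw [show q + 1 - 1 = q from by omega]
      exact hsrc
  · rintro ⟨hv, hnear⟩
    unfold near at hnear
    simp only [Bool.or_eq_true, Bool.and_eq_true, decide_eq_true_eq] at hnear
    rcases hnear with ((⟨h1, hcell⟩ | ⟨h1, hcell⟩) | ⟨h1, hcell⟩) | ⟨h1, hcell⟩
    · exact ⟨(i, j - 1),
        List.mem_product.mpr ⟨List.mem_range.mpr hi, List.mem_range.mpr (by omega)⟩,
        hcell, hv, Or.inr (Or.inr (Or.inr ⟨rfl, by omega, hj⟩))⟩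
    · exact ⟨(i - 1, j),
        List.mem_product.mpr ⟨List.mem_range.mpr (by omega), List.mem_range.mpr hj⟩,
        hcell, hv, Or.inr (Or.inr (Or.inl ⟨by omega, rfl, hi⟩))⟩
    · exact ⟨(i + 1, j),
        List.mem_product.mpr ⟨List.mem_range.mpr h1, List.mem_range.mpr hj⟩,
        hcell, hv, Or.inr (Or.inl ⟨rfl, rfl⟩)⟩
    · exact ⟨(i, j + 1),
        List.mem_product.mpr ⟨List.mem_range.mpr hi, List.mem_range.mpr h1⟩,
        hcell, hv, Or.inl ⟨rfl, rfl⟩⟩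

lemma foldl_win {σ : Type} (g : Nat → Nat → σ → σ) :
    ∀ (l₁ l₂ : List Nat) (s : σ),
      l₁.foldl (fun s i => l₂.foldl (fun s j => g i j s) s) s
        = (l₁ ×ˢ l₂).foldl (fun s p => g p.1 p.2 s) s := by
  intro l₁
  induction l₁ with
  | nil => intro l₂ s; simp [List.nil_product]
  | cons a t ih =>
    intro l₂ s
    simp only [List.foldl_cons, List.product_cons, List.foldl_append, List.foldl_map]
    exact ih l₂ _

lemma count_win (q : Nat → Nat → Bool) :
    ∀ (l₁ l₂ : List Nat) (acc : Int),
      l₁.foldl (fun acc i => acc + (((l₂.filter (fun j => q i j)).length : Int))) acc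
        = acc + (((l₁ ×ˢ l₂).filter (fun p => q p.1 p.2)).length : Int) := by
  intro l₁
  induction l₁ with
  | nil => intro l₂ acc; simp [List.nil_product]
  | cons a t ih =>
    intro l₂ acc
    simp only [List.foldl_cons, List.product_cons, List.filter_append, List.length_append]
    rw [ih]
    have hmap : (List.filter (fun p => q p.1 p.2) (List.map (fun b => (a, b)) l₂)).length
        = (l₂.filter (fun j => q a j)).length := by
      rw [List.filter_map, List.length_map]
      rfl
    rw [hmap]
    push_cast
    ring

-- ===== VERDICT (by name: the statement is the Claim_ definition above) =====
theorem helper_spec : Claim_equal_helper := by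
  unfold Claim_equal_helper Spec_helper
  intro v a c ctr _ hpre
  have sh : Shaped v a ctr a.length (a.headD []).length := by
    rcases hpre with rfl | ⟨h2, h3⟩
    · exact ⟨fun r hr => by simp at hr, fun r c hr => by simp at hr⟩
    · refine ⟨?_, ?_⟩
      · intro r hrn
        have hmem : a.getD r [] ∈ a := by
          rw [List.getD_eq_getElem?_getD, List.getElem?_eq_getElem hrn]
          exact List.getElem_mem hrn
        exact h2 _ hmem
      · intro r c hrn hcm hval hnear
        apply h3 r (List.mem_range.mpr hrn) c (List.mem_range.mpr hcm) hval
        simp only [near, Bool.or_eq_true, Bool.and_eq_true, decide_eq_true_eq] at hnear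
        tauto
  have h0 : PassInv v a ctr c a.length (a.headD []).length (fun _ _ => false) (v, a, c) :=
    ⟨rfl, fun _ => rfl, rfl, fun _ => rfl,
     fun i j => by simp,
     fun i j => by simp,
     fun i j h => by simp at h,
     by simp⟩
  have hbounds : ∀ p ∈ winL a.length (a.headD []).length,
      p.1 < a.length ∧ p.2 < (a.headD []).length := by
    intro p hp
    obtain ⟨p1, p2⟩ := p
    obtain ⟨hA, hB⟩ := List.mem_product.mp hp
    exact ⟨List.mem_range.mp hA, List.mem_range.mp hB⟩
  have hinv := fold_inv sh rfl (winL a.length (a.headD []).length) (fun _ _ => false)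
    (v, a, c) hbounds h0
  have hw : (List.range a.length) ×ˢ (List.range (a.headD []).length)
      = winL a.length (a.headD []).length := rfl
  have hA : helper v a c ctr
      = ((List.range a.length).foldl
          (fun s i => (List.range (a.headD []).length).foldl
            (fun s j => stepA ctr a.length (a.headD []).length i j s) s)
          (v, a, c)).2.2 := rfl
  rw [hA, foldl_win (fun i j s => stepA ctr a.length (a.headD []).length i j s)
    (List.range a.length) (List.range (a.headD []).length) (v, a, c), hw, hinv.cd]
  have hF : ∀ p ∈ winL a.length (a.headD []).length,
      (((winL a.length (a.headD []).length).foldl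
        (fun g p => stepF a ctr a.length (a.headD []).length g p.1 p.2) (fun _ _ => false)) p.1 p.2
        && !cell false v p.1 p.2)
      = (decide (ctr + 1 < cell 0 a p.1 p.2)
          && near a ctr a.length (a.headD []).length p.1 p.2
          && !cell false v p.1 p.2) := by
    intro p hp
    obtain ⟨hp1, hp2⟩ := hbounds p hp
    congr 1
    rw [Bool.eq_iff_iff, foldl_stepF_true_iff]
    simp only [Bool.and_eq_true, decide_eq_true_eq]
    constructor
    · rintro (hf | hex)
      · simp at hf
      · obtain ⟨hv0, hn0⟩ :=
          (push_iff_near a ctr a.length (a.headD []).length p.1 p.2 hp1 hp2).mp hex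
        exact ⟨hv0, hn0⟩
    · intro hx
      exact Or.inr
        ((push_iff_near a ctr a.length (a.headD []).length p.1 p.2 hp1 hp2).mpr ⟨hx.1, hx.2⟩)
  rw [List.filter_congr hF]
  have hB : helper_alt v a c ctr
      = c - ((List.range a.length).foldl
          (fun acc i => acc + (((List.range (a.headD []).length).filter (fun j =>
            decide (ctr + 1 < cell 0 a i j)
              && near a ctr a.length (a.headD []).length i j
              && !cell false v i j)).length : Int))
          0) := rfl
  rw [hB, count_win (fun i j =>
      decide (ctr + 1 < cell 0 a i j)
        && near a ctr a.length (a.headD []).length i j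
        && !cell false v i j)
    (List.range a.length) (List.range (a.headD []).length) 0, hw]
  ring
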